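-- pv_equiv track=rewrite | github.com/TheBargainB/admin-product | backend/scripts/import_albert_heijn.py | extract_image_url
-- ===== SOURCE A (Python) =====
-- from typing import Dict, Any, Optional, Tuple
--
-- def extract_image_url(image_pack: list) -> Optional[str]:
--     """Extract the best image URL from imagePack"""
--     if not image_pack or not isinstance(image_pack, list):
--         return None
--
--     # Prefer medium size image
--     for img in image_pack:
--         if img.get("medium", {}).get("url"):
--             return img["medium"]["url"]
--
--     # Fallback to small if medium not available
--     for img in image_pack:
--         if img.get("small", {}).get("url"):
--             return img["small"]["url"]
--
--     return None
-- ===== SOURCE B (Python) =====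
-- from typing import Optional
--
-- def extract_image_url(image_pack: list) -> Optional[str]:
--     """Backward fold: walk the list in reverse keeping the pair
--     (first medium url, first small url) — earlier elements overwrite —
--     then combine: medium wins over small."""
--     if not image_pack or not isinstance(image_pack, list):
--         return None
--     medium = small = None
--     for img in reversed(image_pack):
--         medium = img.get("medium", {}).get("url") or medium
--         small = img.get("small", {}).get("url") or small
--     return medium or small
-- ===== Notes on version B (the rewrite author's own statement) =====
-- stated objective: alternative
-- what changed: Replaces A's two forward scans with early return by a single backward fold that accumulates the pair (first medium url, first small url) and combines them at the end.
import Mathlib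
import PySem

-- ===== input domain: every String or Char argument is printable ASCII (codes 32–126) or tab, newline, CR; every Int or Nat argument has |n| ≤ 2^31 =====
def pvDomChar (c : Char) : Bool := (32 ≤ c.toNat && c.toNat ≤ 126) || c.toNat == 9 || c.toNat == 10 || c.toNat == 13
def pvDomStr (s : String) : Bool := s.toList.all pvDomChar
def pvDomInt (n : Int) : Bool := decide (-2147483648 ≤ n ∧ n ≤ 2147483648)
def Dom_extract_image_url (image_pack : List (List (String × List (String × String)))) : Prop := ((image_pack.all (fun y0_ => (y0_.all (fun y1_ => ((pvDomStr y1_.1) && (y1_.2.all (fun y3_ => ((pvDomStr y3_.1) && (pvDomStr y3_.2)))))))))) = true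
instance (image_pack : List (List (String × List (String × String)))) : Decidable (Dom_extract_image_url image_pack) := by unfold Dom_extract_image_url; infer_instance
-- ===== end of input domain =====

-- B replaces A's two forward scans with early return by one backward fold over the reversed
-- list accumulating (first medium url, first small url); same return value everywhere.

-- ===== PORT A =====
-- img.get(k, {}).get("url") as a truthy url: first-match dict lookup, empty string is falsy (None and falsy map to none)
def pvAUrl (img : List (String × List (String × String))) (k : String) : Option String :=
  match img.lookup k with
  | none => none
  | some d =>
    match d.lookup "url" with
    | none => none
    | some u => if u = "" then none else some u

-- first loop: return on first truthy medium; second loop: first truthy small; else None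
def pvALoopMedium (l : List (List (String × List (String × String)))) : Option String :=
  match l with
  | [] => none
  | img :: rest =>
    match pvAUrl img "medium" with
    | some u => some u
    | none => pvALoopMedium rest

def pvALoopSmall (l : List (List (String × List (String × String)))) : Option String :=
  match l with
  | [] => none
  | img :: rest =>
    match pvAUrl img "small" with
    | some u => some u
    | none => pvALoopSmall rest

def extract_image_url (image_pack : List (List (String × List (String × String)))) : Option String :=
  if image_pack = [] then none
  else
    match pvALoopMedium image_pack with
    | some u => some u
    | none => pvALoopSmall image_pack

-- ===== PORT B =====
-- Python's `x or y` over url-option values (left operand wins unless falsy)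
def pvOrElse (x y : Option String) : Option String :=
  match x with
  | some u => some u
  | none => y

-- B reuses the same .get(k, {}).get("url") accessor pvAUrl; the traversal is a backward fold
-- over the reversed list with a pair accumulator (first medium url, first small url).
def extract_image_url_alt (image_pack : List (List (String × List (String × String)))) : Option String :=
  if image_pack = [] then none
  else
    let p := image_pack.reverse.foldl
      (fun acc img => (pvOrElse (pvAUrl img "medium") acc.1, pvOrElse (pvAUrl img "small") acc.2))
      (none, none)
    pvOrElse p.1 p.2

-- ===== PRECONDITION & SPEC =====
def Spec_extract_image_url (image_pack : List (List (String × List (String × String)))) (out : Option String) : Prop := out = extract_image_url_alt image_pack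
instance (image_pack : List (List (String × List (String × String)))) (out : Option String) : Decidable (Spec_extract_image_url image_pack out) := by unfold Spec_extract_image_url; infer_instance

-- ===== CLAIM (what is proved, stated in full; the proofs are below) =====
def Claim_equal_extract_image_url : Prop := ∀ (image_pack : List (List (String × List (String × String)))), Dom_extract_image_url image_pack → Spec_extract_image_url image_pack (extract_image_url image_pack)

-- ===== LEMMAS AND PROOFS =====
-- The backward fold computes exactly the pair (first medium of A's first loop, first small of A's second loop).
theorem pvFold_eq (l : List (List (String × List (String × String)))) :
    l.reverse.foldl
      (fun acc img => (pvOrElse (pvAUrl img "medium") acc.1, pvOrElse (pvAUrl img "small") acc.2))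
      (none, none)
    = (pvALoopMedium l, pvALoopSmall l) := by
  rw [List.foldl_reverse]
  induction l with
  | nil => rfl
  | cons img rest ih =>
    simp only [List.foldr_cons, ih, pvALoopMedium, pvALoopSmall]
    cases pvAUrl img "medium" <;> cases pvAUrl img "small" <;> rfl

-- ===== VERDICT (by name: the statement is the Claim_ definition above) =====
theorem extract_image_url_spec : Claim_equal_extract_image_url := by
  intro image_pack _
  unfold Spec_extract_image_url extract_image_url extract_image_url_alt
  by_cases h : image_pack = []
  · simp [h]
  · simp only [h, if_false, pvFold_eq]
    cases pvALoopMedium image_pack <;> rfl
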